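-- pv_equiv track=rewrite | github.com/Coidemo/TextffCut | core/text_processor.py | _convert_position_with_spaces
-- ===== SOURCE A (Python) =====
-- def _convert_position_with_spaces(text_with_spaces: str, text_no_spaces: str, pos_no_spaces: int) -> int:
--     """空白を除去したテキストの位置を、元のテキストの位置に変換"""
--     original_pos = 0
--     no_spaces_pos = 0
--
--     while no_spaces_pos < pos_no_spaces and original_pos < len(text_with_spaces):
--         if not text_with_spaces[original_pos].isspace():
--             no_spaces_pos += 1
--         original_pos += 1
--
--     return original_pos
-- ===== SOURCE B (Python) =====
-- def _convert_position_with_spaces(text_with_spaces: str, text_no_spaces: str, pos_no_spaces: int) -> int: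
--     """空白を除去したテキストの位置を、元のテキストの位置に変換"""
--     indices = [i for i, c in enumerate(text_with_spaces) if not c.isspace()]
--     if pos_no_spaces <= 0:
--         return 0
--     if pos_no_spaces <= len(indices):
--         return indices[pos_no_spaces - 1] + 1
--     return len(text_with_spaces)
-- ===== Notes on version B (the rewrite author's own statement) =====
-- stated objective: alternative
-- what changed: Replaces A's early-stopping counting while-loop over two counters by a two-phase computation: precompute the index table of all non-space positions, then answer by a direct lookup indices[pos-1]+1 (0 if pos<=0, len(text) if pos exceeds the table).
import Mathlib
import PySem

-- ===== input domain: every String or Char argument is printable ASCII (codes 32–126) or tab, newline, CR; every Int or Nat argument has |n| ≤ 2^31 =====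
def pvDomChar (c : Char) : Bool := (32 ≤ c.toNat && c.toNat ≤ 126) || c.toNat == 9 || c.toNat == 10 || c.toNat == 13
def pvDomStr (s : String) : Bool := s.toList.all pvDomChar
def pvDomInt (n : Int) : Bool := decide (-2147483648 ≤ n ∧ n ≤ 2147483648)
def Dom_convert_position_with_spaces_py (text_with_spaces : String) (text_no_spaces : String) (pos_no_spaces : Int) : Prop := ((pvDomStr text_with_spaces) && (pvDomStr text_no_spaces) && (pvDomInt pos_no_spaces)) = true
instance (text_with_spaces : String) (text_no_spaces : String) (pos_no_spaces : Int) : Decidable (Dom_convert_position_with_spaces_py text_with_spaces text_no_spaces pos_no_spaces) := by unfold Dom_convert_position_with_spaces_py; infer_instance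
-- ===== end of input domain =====

-- B replaces A's early-stopping counting while-loop by a precomputed non-space index table plus direct lookup (alternative decomposition, same O(n) cost; return-value equivalence).


-- ===== PORT A =====
-- the while loop, transliterated: state (original_pos, no_spaces_pos), walking the remaining characters
def pvALoop : List Char → Int → Int → Int → Int
  | [], original_pos, _, _ => original_pos
  | c :: rest, original_pos, no_spaces_pos, pos_no_spaces =>
    if no_spaces_pos < pos_no_spaces then
      if !PySem.Chars.isspace c then
        pvALoop rest (original_pos + 1) (no_spaces_pos + 1) pos_no_spaces
      else
        pvALoop rest (original_pos + 1) no_spaces_pos pos_no_spaces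
    else original_pos

def convert_position_with_spaces_py (text_with_spaces : String) (text_no_spaces : String) (pos_no_spaces : Int) : Int :=
  pvALoop text_with_spaces.toList 0 0 pos_no_spaces

-- ===== PORT B =====
-- indices = [i for i, c in enumerate(text_with_spaces) if not c.isspace()]
def pvIdx (cs : List Char) : List Int :=
  ((PySem.List.enumerate cs).filter (fun p => !PySem.Chars.isspace p.2)).map (·.1)

def convert_position_with_spaces_py_alt (text_with_spaces : String) (text_no_spaces : String) (pos_no_spaces : Int) : Int :=
  let indices := pvIdx text_with_spaces.toList
  if pos_no_spaces ≤ 0 then 0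
  else if pos_no_spaces ≤ indices.length then
    -- Python indices[pos_no_spaces-1]: the index is in range in this branch, so getD is exact
    indices.getD (pos_no_spaces - 1).toNat 0 + 1
  else (text_with_spaces.toList.length : Int)

-- ===== PRECONDITION & SPEC =====
def Spec_convert_position_with_spaces_py (text_with_spaces : String) (text_no_spaces : String) (pos_no_spaces : Int) (out : Int) : Prop := out = convert_position_with_spaces_py_alt text_with_spaces text_no_spaces pos_no_spaces
instance (text_with_spaces : String) (text_no_spaces : String) (pos_no_spaces : Int) (out : Int) : Decidable (Spec_convert_position_with_spaces_py text_with_spaces text_no_spaces pos_no_spaces out) := by unfold Spec_convert_position_with_spaces_py; infer_instance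

-- ===== CLAIM (what is proved, stated in full; the proofs are below) =====
def Claim_equal_convert_position_with_spaces_py : Prop := ∀ (text_with_spaces : String) (text_no_spaces : String) (pos_no_spaces : Int), Dom_convert_position_with_spaces_py text_with_spaces text_no_spaces pos_no_spaces → Spec_convert_position_with_spaces_py text_with_spaces text_no_spaces pos_no_spaces (convert_position_with_spaces_py text_with_spaces text_no_spaces pos_no_spaces)

-- ===== LEMMAS AND PROOFS =====

-- B's answer as a function of the character list and the (shifted) position
def pvG (cs : List Char) (k : Int) : Int :=
  if k ≤ 0 then 0
  else if k ≤ (pvIdx cs).length then (pvIdx cs).getD (k - 1).toNat 0 + 1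
  else (cs.length : Int)

theorem pvIdx_shift (cs : List Char) (s : Int) :
    ((PySem.List.enumerate cs s).filter (fun p => !PySem.Chars.isspace p.2)).map (·.1)
      = (pvIdx cs).map (· + s) := by
  induction cs generalizing s with
  | nil => simp [pvIdx, PySem.List.enumerate_nil]
  | cons c rest ih =>
    simp only [pvIdx, PySem.List.enumerate_cons, List.filter_cons]
    by_cases h : PySem.Chars.isspace c
    · simp only [h, Bool.not_true, Bool.false_eq_true, if_false]
      rw [ih (s + 1), show (0:Int)+1 = 1 by norm_num, ih 1, List.map_map]
      apply List.map_congr_left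
      intro a _
      simp [Function.comp]
      ring
    · rw [Bool.not_eq_true] at h
      simp only [h, Bool.not_false, if_true, List.map_cons]
      rw [ih (s + 1), show (0:Int)+1 = 1 by norm_num, ih 1, List.map_map]
      refine congrArg₂ _ (by ring) ?_
      apply List.map_congr_left
      intro a _
      simp [Function.comp]
      ring

theorem pvIdx_cons (c : Char) (rest : List Char) :
    pvIdx (c :: rest) =
      if PySem.Chars.isspace c then (pvIdx rest).map (· + 1)
      else 0 :: (pvIdx rest).map (· + 1) := by
  simp only [pvIdx, PySem.List.enumerate_cons, List.filter_cons]
  by_cases h : PySem.Chars.isspace c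
  · simp only [h, Bool.not_true, Bool.false_eq_true, if_false, if_true]
    rw [show (0:Int)+1 = 1 by norm_num]
    exact pvIdx_shift rest 1
  · rw [Bool.not_eq_true] at h
    simp only [h, Bool.not_false, if_true, Bool.false_eq_true, if_false, List.map_cons]
    rw [show (0:Int)+1 = 1 by norm_num]
    exact congrArg _ (pvIdx_shift rest 1)

theorem pvG_nil (k : Int) : pvG [] k = 0 := by
  simp [pvG, pvIdx, PySem.List.enumerate_nil]

theorem pvG_cons_space (c : Char) (rest : List Char) (k : Int)
    (hc : PySem.Chars.isspace c = true) (hk : 0 < k) :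
    pvG (c :: rest) k = 1 + pvG rest k := by
  have hidx := pvIdx_cons c rest
  rw [hc, if_pos rfl] at hidx
  unfold pvG
  rw [hidx]
  simp only [List.length_map]
  simp only [if_neg (show ¬ k ≤ 0 by omega)]
  by_cases h2 : k ≤ ((pvIdx rest).length : Int)
  · simp only [if_pos h2]
    have hlt : (k - 1).toNat < (pvIdx rest).length := by omega
    rw [List.getD_eq_getElem _ _ (by simpa using hlt), List.getElem_map,
      List.getD_eq_getElem _ _ hlt]
    ring
  · simp only [if_neg h2]
    simp only [List.length_cons]
    push_cast
    ring

theorem pvG_cons_nonspace (c : Char) (rest : List Char) (k : Int)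
    (hc : PySem.Chars.isspace c = false) (hk : 0 < k) :
    pvG (c :: rest) k = 1 + pvG rest (k - 1) := by
  have hidx := pvIdx_cons c rest
  rw [hc] at hidx
  simp only [Bool.false_eq_true, if_false] at hidx
  unfold pvG
  rw [hidx]
  simp only [List.length_cons, List.length_map]
  simp only [if_neg (show ¬ k ≤ 0 by omega)]
  by_cases hk1 : k = 1
  · subst hk1
    rw [if_pos (by omega : (1:Int) ≤ ((pvIdx rest).length + 1 : Nat))]
    norm_num
  · have hk2 : 2 ≤ k := by omega
    by_cases h2 : k - 1 ≤ ((pvIdx rest).length : Int)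
    · rw [if_pos (by omega : k ≤ ((pvIdx rest).length + 1 : Nat)),
        if_neg (by omega : ¬ k - 1 ≤ 0), if_pos h2]
      have hlt : (k - 2).toNat < (pvIdx rest).length := by omega
      have hkn : (k - 1).toNat = (k - 2).toNat + 1 := by omega
      have hkn2 : (k - 1 - 1).toNat = (k - 2).toNat := by omega
      rw [hkn, hkn2, List.getD_cons_succ,
        List.getD_eq_getElem _ _ (by simpa using hlt), List.getElem_map,
        List.getD_eq_getElem _ _ hlt]
      ring
    · rw [if_neg (by omega : ¬ k ≤ ((pvIdx rest).length + 1 : Nat)),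
        if_neg (by omega : ¬ k - 1 ≤ 0), if_neg h2]
      push_cast
      ring

theorem pvALoop_eq_pvG (cs : List Char) (op np pos : Int) :
    pvALoop cs op np pos = op + pvG cs (pos - np) := by
  induction cs generalizing op np with
  | nil => simp [pvALoop, pvG_nil]
  | cons c rest ih =>
    by_cases h : np < pos
    · cases hc : PySem.Chars.isspace c with
      | true =>
        simp only [pvALoop, if_pos h, hc, Bool.not_true, Bool.false_eq_true, if_false]
        rw [ih, pvG_cons_space c rest (pos - np) hc (by omega)]
        ring
      | false =>
        simp only [pvALoop, if_pos h, hc, Bool.not_false, if_true]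
        rw [ih, pvG_cons_nonspace c rest (pos - np) hc (by omega)]
        have : pos - (np + 1) = pos - np - 1 := by ring
        rw [this]
        ring
    · simp only [pvALoop, if_neg h]
      have : pvG (c :: rest) (pos - np) = 0 := by
        unfold pvG
        rw [if_pos (by omega : pos - np ≤ 0)]
      rw [this]; ring

theorem alt_eq_pvG (t tn : String) (pos : Int) :
    convert_position_with_spaces_py_alt t tn pos = pvG t.toList pos := by
  simp [convert_position_with_spaces_py_alt, pvG]

-- ===== VERDICT (by name: the statement is the Claim_ definition above) =====
theorem convert_position_with_spaces_py_spec : Claim_equal_convert_position_with_spaces_py := by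
  intro t tn pos _
  unfold Spec_convert_position_with_spaces_py
  rw [convert_position_with_spaces_py, pvALoop_eq_pvG, alt_eq_pvG]
  simp
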